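-- pv_equiv track=rewrite | github.com/jemen04/eeprom | eeprom/eeprom_rwr.py | ascii2_char
-- ===== SOURCE A (Python) =====
-- def ascii2_char(list_data):
--     '''Function that converts a list of ascii to char '''
--     data = []
--     words = ""
--
--     for i in range(0, len(list_data)):                  #iterates through data
--
--         if 0<= list_data[i] <= 126:                     #ascii range (0-126)
--             if list_data[i] == 10 and len(words) != "": #newline found append sentence
--                 data.append(words)
--                 words = ""
--             else:                                       #regular char, build sentence
--                 words += chr(list_data[i])
--         if i == len(list_data)-1 and words != "":       #end of file, add sentence
--             data.append(words)
--
--     return data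
-- ===== SOURCE B (Python) =====
-- def ascii2_char(list_data):
--     '''Function that converts a list of ascii to char '''
--     s = ''.join(chr(c) for c in list_data if 0 <= c <= 126)
--     parts = s.split('\n')
--     if parts and parts[-1] == '':
--         parts.pop()
--     return parts
-- ===== Notes on version B (the rewrite author's own statement) =====
-- stated objective: idiomatic
-- what changed: Replaces the index loop with stateful word accumulation, newline flushes and a last-index check by a filter/join of the kept characters followed by a single split('\n') with one trailing empty segment dropped.
import Mathlib
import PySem

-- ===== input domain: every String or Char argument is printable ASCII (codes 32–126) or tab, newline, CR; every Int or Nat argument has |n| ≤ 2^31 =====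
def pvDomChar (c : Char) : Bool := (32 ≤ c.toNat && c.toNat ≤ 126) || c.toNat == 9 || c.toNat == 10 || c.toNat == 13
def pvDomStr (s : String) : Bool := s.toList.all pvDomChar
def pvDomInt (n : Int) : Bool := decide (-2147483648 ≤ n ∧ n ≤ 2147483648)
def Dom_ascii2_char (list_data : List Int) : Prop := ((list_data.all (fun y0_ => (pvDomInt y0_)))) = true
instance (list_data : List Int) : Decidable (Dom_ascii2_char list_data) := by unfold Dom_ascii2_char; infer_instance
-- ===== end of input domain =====

-- B replaces A's stateful word-accumulation loop by filter/join of the kept characters, one split on '\n'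
-- and dropping one trailing empty segment (idiomatic decomposition; same O(n) cost).

-- ===== PORT A =====
def ascii2_char (list_data : List Int) : List String :=
  let n : Int := PySem.List.len list_data
  let st := (PySem.List.pyRange 0 n).foldl
    (fun (st : List String × String) i =>
      let c := PySem.List.pyGetD list_data i 0   -- list_data[i]; i is always in range here
      let st1 :=
        if 0 ≤ c ∧ c ≤ 126 then
          -- Python's `len(words) != ""` compares an int with a str and is always True
          if c = 10 then (st.1 ++ [st.2], "") else (st.1, st.2.push (Char.ofNat c.toNat))
        else st
      if i = n - 1 ∧ st1.2 ≠ "" then (st1.1 ++ [st1.2], st1.2) else st1)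
    ([], "")
  st.1

-- ===== PORT B =====
def ascii2_char_alt (list_data : List Int) : List String :=
  let s := PySem.Str.join ""
    ((list_data.filter (fun c => decide (0 ≤ c ∧ c ≤ 126))).map
      (fun c => String.ofList [Char.ofNat c.toNat]))
  let parts := (PySem.Str.split? s "\n").getD []   -- sep "\n" ≠ "", so split? never fails
  if parts ≠ [] ∧ parts.getLastD "" = "" then parts.dropLast else parts

-- ===== PRECONDITION & SPEC =====
def Spec_ascii2_char (list_data : List Int) (out : List String) : Prop := out = ascii2_char_alt list_data
instance (list_data : List Int) (out : List String) : Decidable (Spec_ascii2_char list_data out) := by unfold Spec_ascii2_char; infer_instance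

-- ===== CLAIM (what is proved, stated in full; the proofs are below) =====
def Claim_equal_ascii2_char : Prop := ∀ (list_data : List Int), Dom_ascii2_char list_data → Spec_ascii2_char list_data (ascii2_char list_data)

-- ===== LEMMAS AND PROOFS =====

/-- The character Python's `chr` produces for a code `0 ≤ c ≤ 126`. -/
def chrI (c : Int) : Char := Char.ofNat c.toNat

/-- A's loop body at `String` level, without the last-index flush. -/
def stepS (st : List String × String) (c : Int) : List String × String :=
  if 0 ≤ c ∧ c ≤ 126 then
    if c = 10 then (st.1 ++ [st.2], "") else (st.1, st.2.push (Char.ofNat c.toNat))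
  else st

/-- The same body with the accumulated word kept as a `List Char`. -/
def stepCI (st : List (List Char) × List Char) (c : Int) : List (List Char) × List Char :=
  if 0 ≤ c ∧ c ≤ 126 then
    if c = 10 then (st.1 ++ [st.2], []) else (st.1, st.2 ++ [Char.ofNat c.toNat])
  else st

/-- The kept-character body (after filtering and `chr`). -/
def stepC (st : List (List Char) × List Char) (c : Char) : List (List Char) × List Char :=
  if c = '\n' then (st.1 ++ [st.2], []) else (st.1, st.2 ++ [c])

/-- A's final flush. -/
def flushC (st : List (List Char) × List Char) : List (List Char) :=
  if st.2 ≠ [] then st.1 ++ [st.2] else st.1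

/-- Pure split on `'\n'` (always returns a nonempty list of segments). -/
def splitNl : List Char → List (List Char)
  | [] => [[]]
  | c :: cs => if c = '\n' then [] :: splitNl cs
      else (c :: (splitNl cs).headI) :: (splitNl cs).tail

/-- B's trailing-empty-segment trim, at `List Char` level. -/
def trimC (P : List (List Char)) : List (List Char) :=
  if P.getLast? = some [] then P.dropLast else P

theorem splitNl_ne_nil (cs : List Char) : splitNl cs ≠ [] := by
  cases cs with
  | nil => simp [splitNl]
  | cons c cs => unfold splitNl; split <;> simp

theorem splitNl_cons_self (cs : List Char) :
    (splitNl cs).headI :: (splitNl cs).tail = splitNl cs := by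
  cases h : splitNl cs with
  | nil => exact absurd h (splitNl_ne_nil cs)
  | cons p ps => simp

theorem go_eq (fuel : Nat) : ∀ (l cur acc : _), l.length < fuel →
    PySem.Chars.splitOn.go ['\n'] fuel l cur acc
      = acc.reverse ++ ((cur.reverse ++ (splitNl l).headI) :: (splitNl l).tail) := by
  induction fuel with
  | zero => intro l cur acc h; omega
  | succ fuel ih =>
    intro l cur acc h
    match l with
    | [] => simp [PySem.Chars.splitOn.go, splitNl]
    | c :: rest =>
      rw [PySem.Chars.splitOn.go]
      by_cases hc : c = '\n'
      · subst hc
        rw [if_pos (by simp [List.isPrefixOf])]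
        simp only [List.length_cons, List.drop_succ_cons, List.length_nil, List.drop_zero]
        rw [ih rest [] (cur.reverse :: acc) (by simp at h; omega)]
        rw [show splitNl ('\n' :: rest) = [] :: splitNl rest from by simp [splitNl]]
        simp [splitNl_cons_self]
      · rw [if_neg (by simp [List.isPrefixOf]; exact fun hh => absurd hh.symm hc)]
        rw [ih rest (c :: cur) acc (by simp at h ⊢; omega)]
        rw [show splitNl (c :: rest) = (c :: (splitNl rest).headI) :: (splitNl rest).tail from by
          simp [splitNl, hc]]
        simp

theorem splitOn_eq (cs : List Char) : PySem.Chars.splitOn cs ['\n'] = splitNl cs := by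
  unfold PySem.Chars.splitOn
  rw [go_eq (cs.length + 1) cs [] [] (by omega)]
  simp [splitNl_cons_self]

theorem trimC_cons (x : List Char) (Q : List (List Char)) (h : Q ≠ []) :
    trimC (x :: Q) = x :: trimC Q := by
  cases Q with
  | nil => exact absurd rfl h
  | cons q qs =>
    unfold trimC
    rw [List.getLast?_cons_cons, List.dropLast_cons_of_ne_nil (by simp)]
    split <;> rfl

theorem core_fold (cs : List Char) : ∀ (D : List (List Char)) (W : List Char),
    flushC (cs.foldl stepC (D, W))
      = D ++ trimC ((W ++ (splitNl cs).headI) :: (splitNl cs).tail) := by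
  induction cs with
  | nil =>
    intro D W
    by_cases hW : W = [] <;> simp [flushC, trimC, splitNl, hW]
  | cons c cs ih =>
    intro D W
    rw [List.foldl_cons]
    by_cases hc : c = '\n'
    · subst hc
      rw [show stepC (D, W) '\n' = (D ++ [W], []) from by simp [stepC]]
      rw [ih (D ++ [W]) []]
      rw [show splitNl ('\n' :: cs) = [] :: splitNl cs from by simp [splitNl]]
      cases h : splitNl cs with
      | nil => exact absurd h (splitNl_ne_nil cs)
      | cons p ps =>
        simp only [List.headI_cons, List.tail_cons, List.append_nil]
        rw [trimC_cons W (p :: ps) (by simp)]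
        simp
    · rw [show stepC (D, W) c = (D, W ++ [c]) from by simp [stepC, hc]]
      rw [ih D (W ++ [c])]
      rw [show splitNl (c :: cs) = (c :: (splitNl cs).headI) :: (splitNl cs).tail from by
        simp [splitNl, hc]]
      simp

theorem char_toNat_ofNat : ∀ n < 127, (Char.ofNat n).toNat = n := by decide

theorem stepCI_eq_stepC (st : List (List Char) × List Char) (c : Int)
    (h0 : 0 ≤ c) (h1 : c ≤ 126) : stepCI st c = stepC st (chrI c) := by
  unfold stepCI stepC chrI
  rw [if_pos ⟨h0, h1⟩]
  by_cases hc : c = 10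
  · subst hc; rfl
  · rw [if_neg hc, if_neg ?_]
    intro hch
    have := char_toNat_ofNat c.toNat (by omega)
    rw [hch] at this
    simp only [show ('\n').toNat = 10 from rfl] at this
    omega

/-- Transfer A's `String`-state fold to the `List Char`-state fold. -/
theorem foldS_eq_foldCI (l : List Int) : ∀ (D : List (List Char)) (W : List Char),
    l.foldl stepS (D.map String.ofList, String.ofList W)
      = ((l.foldl stepCI (D, W)).1.map String.ofList,
         String.ofList (l.foldl stepCI (D, W)).2) := by
  induction l with
  | nil => intro D W; simp
  | cons c l ih =>
    intro D W
    rw [List.foldl_cons, List.foldl_cons]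
    by_cases hp : 0 ≤ c ∧ c ≤ 126
    · by_cases hc : c = 10
      · rw [show stepS (D.map String.ofList, String.ofList W) c
              = ((D ++ [W]).map String.ofList, String.ofList []) from by
            simp [stepS, hc]]
        rw [show stepCI (D, W) c = (D ++ [W], []) from by simp [stepCI, hc]]
        exact ih (D ++ [W]) []
      · rw [show stepS (D.map String.ofList, String.ofList W) c
              = (D.map String.ofList, String.ofList (W ++ [Char.ofNat c.toNat])) from by
            simp only [stepS, if_pos hp, if_neg hc]
            refine Prod.ext rfl ?_
            rw [← String.toList_inj]
            simp]
        rw [show stepCI (D, W) c = (D, W ++ [Char.ofNat c.toNat]) from by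
            simp [stepCI, hp, hc]]
        exact ih D (W ++ [Char.ofNat c.toNat])
    · rw [show stepS (D.map String.ofList, String.ofList W) c
            = (D.map String.ofList, String.ofList W) from by simp [stepS, hp]]
      rw [show stepCI (D, W) c = (D, W) from by simp [stepCI, hp]]
      exact ih D W

theorem pyRange_self_nil (n : Int) : PySem.List.pyRange n n = [] := by
  refine List.eq_nil_iff_forall_not_mem.mpr ?_
  intro x hx; rw [PySem.List.mem_pyRange_one] at hx; omega

theorem pyRange_single (n : Int) : PySem.List.pyRange n (n + 1) = [n] := by
  rw [PySem.List.pyRange_one_cons (by omega), pyRange_self_nil]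

/-- A's port equals the plain element fold followed by the final flush, at `String` level. -/
theorem A_eq_foldS (l : List Int) :
    ascii2_char l =
      (if (l.foldl stepS ([], "")).2 ≠ "" then
        (l.foldl stepS ([], "")).1 ++ [(l.foldl stepS ([], "")).2]
      else (l.foldl stepS ([], "")).1) := by
  rcases List.eq_nil_or_concat l with rfl | ⟨L, a, rfl⟩
  · simp [ascii2_char, PySem.List.len]
  · unfold ascii2_char
    simp only [List.concat_eq_append, PySem.List.len]
    have hlen : ((L ++ [a]).length : Int) = (L.length : Int) + 1 := by simp
    rw [hlen]
    have hsplit : PySem.List.pyRange 0 ((L.length : Int) + 1)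
        = PySem.List.pyRange 0 (L.length : Int) ++ [(L.length : Int)] := by
      rw [PySem.List.pyRange_one_append 0 (L.length : Int) ((L.length : Int) + 1)
        (by positivity) (by omega), pyRange_single]
    rw [hsplit, List.foldl_append]
    have hbody : List.foldl
        (fun (st : List String × String) i =>
          let c := PySem.List.pyGetD (L ++ [a]) i 0
          let st1 :=
            if 0 ≤ c ∧ c ≤ 126 then
              if c = 10 then (st.1 ++ [st.2], "") else (st.1, st.2.push (Char.ofNat c.toNat))
            else st
          if i = (L.length : Int) + 1 - 1 ∧ st1.2 ≠ "" then (st1.1 ++ [st1.2], st1.2) else st1)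
        ([], "") (PySem.List.pyRange 0 (L.length : Int))
        = List.foldl stepS ([], "") L := by
      rw [PySem.List.foldl_congr_mem _ _
        (fun (st : List String × String) i => stepS st (PySem.List.pyGetD L i 0)) _ ?_]
      · have := PySem.List.foldl_pyRange_pyGetD L 0 stepS ([], "") (a := 0) le_rfl
        simpa [PySem.List.len] using this
      · intro st i hi
        rw [PySem.List.mem_pyRange_one] at hi
        have hgd : PySem.List.pyGetD (L ++ [a]) i 0 = PySem.List.pyGetD L i 0 := by
          rw [PySem.List.pyGetD_eq_getElem _ _ hi.1 (by simp; omega),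
              PySem.List.pyGetD_eq_getElem _ _ hi.1 (by exact_mod_cast hi.2)]
          rw [List.getElem_append_left (by omega)]
        simp only [hgd, stepS]
        rw [if_neg (by rintro ⟨h1, -⟩; omega)]
    rw [hbody, List.foldl_cons, List.foldl_nil]
    have ha : PySem.List.pyGetD (L ++ [a]) (L.length : Int) 0 = a := by
      rw [PySem.List.pyGetD_eq_getElem _ _ (by positivity) (by simp)]
      simp
    rw [List.foldl_append, List.foldl_cons, List.foldl_nil]
    simp only [ha]
    set st := List.foldl stepS ([], "") L with hst
    show (if ((L.length : Int) = (L.length : Int) + 1 - 1 ∧ (stepS st a).2 ≠ "") then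
        ((stepS st a).1 ++ [(stepS st a).2], (stepS st a).2) else stepS st a).1
      = if (stepS st a).2 ≠ "" then (stepS st a).1 ++ [(stepS st a).2] else (stepS st a).1
    by_cases hw : (stepS st a).2 = ""
    · rw [if_neg (by rintro ⟨-, h2⟩; exact h2 hw), if_neg (by simpa using hw)]
    · rw [if_pos ⟨by omega, hw⟩, if_pos hw]

theorem ofList_ne_empty_iff (W : List Char) : String.ofList W ≠ "" ↔ W ≠ [] := by
  rw [not_iff_not, show ("" : String) = String.ofList [] from rfl, ← String.toList_inj]
  simp

/-- B's port, reduced to `splitNl` of the kept characters. -/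
theorem B_eq (l : List Int) :
    ascii2_char_alt l =
      (trimC (splitNl ((l.filter (fun c => decide (0 ≤ c ∧ c ≤ 126))).map chrI))).map
        String.ofList := by
  unfold ascii2_char_alt
  have hs : (PySem.Str.join ""
      ((l.filter (fun c => decide (0 ≤ c ∧ c ≤ 126))).map
        (fun c => String.ofList [Char.ofNat c.toNat]))).toList
      = (l.filter (fun c => decide (0 ≤ c ∧ c ≤ 126))).map chrI := by
    have hj : ∀ p : List String,
        PySem.Str.join "" p = String.ofList (PySem.Chars.join [] (p.map String.toList)) := by
      intro p; simp [PySem.Str.join]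
    rw [hj]
    simp only [String.toList_ofList, List.map_map]
    have : ((fun s => s.toList) ∘ fun c => String.ofList [Char.ofNat c.toNat])
        = (fun ch => [ch]) ∘ chrI := by
      funext c; simp [chrI]
    rw [this, ← List.map_map]
    exact PySem.Chars.join_nil_singletons _
  set cs := (l.filter (fun c => decide (0 ≤ c ∧ c ≤ 126))).map chrI with hcs
  have hsplit : PySem.Str.split?
      (PySem.Str.join ""
        ((l.filter (fun c => decide (0 ≤ c ∧ c ≤ 126))).map
          (fun c => String.ofList [Char.ofNat c.toNat]))) "\n"
      = some ((splitNl cs).map String.ofList) := by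
    rw [PySem.Str.split?]
    rw [show ("\n" : String).toList = ['\n'] from by decide]
    rw [PySem.Chars.split?, if_neg (by simp)]
    rw [hs, splitOn_eq]
    rfl
  simp only [hsplit, Option.getD_some]
  set P := splitNl cs with hP
  have hPne : P ≠ [] := splitNl_ne_nil cs
  obtain ⟨q, hq⟩ : ∃ q, P.getLast? = some q := by
    cases h : P.getLast? with
    | none => exact absurd (List.getLast?_eq_none_iff.mp h) hPne
    | some q => exact ⟨q, rfl⟩
  have hne : P.map String.ofList ≠ [] := by simpa using hPne
  have hcond : ((P.map String.ofList).getLastD "" = "") ↔ q = [] := by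
    rw [List.getLastD_eq_getLast?, List.getLast?_map, hq]
    simp only [Option.map_some, Option.getD_some]
    constructor
    · intro h
      have := congrArg String.toList h
      simpa using this
    · rintro rfl; rfl
  by_cases hq0 : q = []
  · rw [if_pos ⟨hne, hcond.mpr hq0⟩]
    unfold trimC
    rw [hq, if_pos (by rw [hq0])]
    exact (List.map_dropLast).symm
  · rw [if_neg (by rintro ⟨-, h2⟩; exact hq0 (hcond.mp h2))]
    unfold trimC
    rw [hq, if_neg (by simpa using hq0)]

theorem inner_eq (st : List (List Char) × List Char) (c : Int)
    (h0 : 0 ≤ c) (h1 : c ≤ 126) :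
    (if c = 10 then (st.1 ++ [st.2], []) else (st.1, st.2 ++ [Char.ofNat c.toNat]))
      = stepC st (chrI c) := by
  have := stepCI_eq_stepC st c h0 h1
  unfold stepCI at this
  rwa [if_pos ⟨h0, h1⟩] at this

-- ===== VERDICT (by name: the statement is the Claim_ definition above) =====
theorem ascii2_char_spec : Claim_equal_ascii2_char := by
  intro l _
  unfold Spec_ascii2_char
  rw [A_eq_foldS, B_eq]
  rw [show (([] : List String), ("" : String))
      = (([] : List (List Char)).map String.ofList, String.ofList []) from rfl]
  rw [foldS_eq_foldCI]
  set cs := (l.filter (fun c => decide (0 ≤ c ∧ c ≤ 126))).map chrI with hcs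
  have hfold : l.foldl stepCI (([] : List (List Char)), ([] : List Char))
      = cs.foldl stepC ([], []) := by
    have h1 : l.foldl stepCI (([] : List (List Char)), ([] : List Char))
        = (l.filter (fun c => decide (0 ≤ c ∧ c ≤ 126))).foldl
            (fun st c => if c = 10 then (st.1 ++ [st.2], []) else (st.1, st.2 ++ [Char.ofNat c.toNat]))
            ([], []) := by
      exact PySem.List.foldl_ite_eq_foldl_filter (fun c => 0 ≤ c ∧ c ≤ 126)
        (fun st c => if c = 10 then (st.1 ++ [st.2], []) else (st.1, st.2 ++ [Char.ofNat c.toNat])) l ([], [])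
    rw [h1, hcs, List.foldl_map]
    exact PySem.List.foldl_congr_mem _ _ _ _ (fun st c hc => by
      have hp := (List.mem_filter.mp hc).2
      have hp' := of_decide_eq_true hp
      exact inner_eq st c hp'.1 hp'.2)
  rw [hfold]
  have hflush : (if String.ofList (cs.foldl stepC ([], [])).2 ≠ "" then
        (cs.foldl stepC ([], [])).1.map String.ofList ++ [String.ofList (cs.foldl stepC ([], [])).2]
      else (cs.foldl stepC ([], [])).1.map String.ofList)
      = (flushC (cs.foldl stepC ([], []))).map String.ofList := by
    unfold flushC
    by_cases hw : (cs.foldl stepC ([], [])).2 = []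
    · rw [if_neg (by simpa [ofList_ne_empty_iff] using hw), if_neg (by simpa using hw)]
    · rw [if_pos (by simpa [ofList_ne_empty_iff] using hw), if_pos (by simpa using hw)]
      simp
  rw [hflush, core_fold cs [] []]
  rw [show (([] : List Char) ++ (splitNl cs).headI) :: (splitNl cs).tail
      = splitNl cs from by rw [List.nil_append]; exact splitNl_cons_self cs]
  simp
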